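-- pv_equiv track=rewrite | github.com/mvilavidal/localglobal2022 | functions.py | is_spiky
-- ===== SOURCE A (Python) =====
-- def is_spiky(arr,consecutive=10):
--     indices=[]
--     inevent=False
--     for i,val in enumerate(arr):
--         if val==True:
--             if inevent:
--                 newevent.append(i)
--             else:
--                 newevent=[i]
--                 inevent=True
--         else:
--             if inevent:
--                 indices.append(newevent)
--                 inevent=False
--
--     if len(indices) == 0:
--         return False
--     return any([len(idx) > consecutive for idx in indices])
-- ===== SOURCE B (Python) =====
-- def is_spiky(arr, consecutive=10):
--     run = 0
--     for val in arr:
--         if val == True: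
--             run += 1
--         else:
--             if run > 0 and run > consecutive:
--                 return True
--             run = 0
--     return False
-- ===== Notes on version B (the rewrite author's own statement) =====
-- stated objective: simpler
-- what changed: Replaces the list-of-index-runs bookkeeping (indices/newevent/inevent plus a final any() pass) with a single integer run-length counter that returns early when a closed run exceeds the threshold; a trailing still-open run is never checked, matching A.
import Mathlib
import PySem

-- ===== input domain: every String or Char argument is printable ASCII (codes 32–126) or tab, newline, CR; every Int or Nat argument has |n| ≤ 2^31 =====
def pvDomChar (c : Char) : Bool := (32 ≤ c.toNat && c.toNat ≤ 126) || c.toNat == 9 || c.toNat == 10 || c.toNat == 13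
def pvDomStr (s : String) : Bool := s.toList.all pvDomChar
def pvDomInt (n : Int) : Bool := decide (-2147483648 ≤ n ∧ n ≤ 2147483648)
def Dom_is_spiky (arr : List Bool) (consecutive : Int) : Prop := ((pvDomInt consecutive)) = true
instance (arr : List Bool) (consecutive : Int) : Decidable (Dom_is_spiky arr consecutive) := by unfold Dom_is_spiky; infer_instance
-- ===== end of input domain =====

-- B replaces A's list-of-index-runs bookkeeping with a single run-length counter and an
-- early return (simpler, same O(n) cost); like A, it never inspects the trailing open run.

-- ===== PORT A =====
-- state = (indices, inevent, newevent), exactly A's three variables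
def is_spiky (arr : List Bool) (consecutive : Int) : Bool :=
  let st := (PySem.List.enumerate arr).foldl
    (fun (st : List (List Int) × Bool × List Int) p =>
      if p.2 == true then
        if st.2.1 then (st.1, st.2.1, st.2.2 ++ [p.1])
        else (st.1, true, [p.1])
      else
        if st.2.1 then (st.1 ++ [st.2.2], false, st.2.2)
        else st)
    ([], false, [])
  if st.1.length = 0 then false
  else st.1.any (fun idx => decide ((idx.length : Int) > consecutive))

-- ===== PORT B =====
-- B's loop with its early `return True` becomes structural recursion on the list
def is_spiky_altLoop (consecutive run : Int) : List Bool → Bool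
  | [] => false
  | v :: rest =>
    if v == true then is_spiky_altLoop consecutive (run + 1) rest
    else if run > 0 ∧ run > consecutive then true
    else is_spiky_altLoop consecutive 0 rest

def is_spiky_alt (arr : List Bool) (consecutive : Int) : Bool :=
  is_spiky_altLoop consecutive 0 arr

-- ===== PRECONDITION & SPEC =====
def Spec_is_spiky (arr : List Bool) (consecutive : Int) (out : Bool) : Prop := out = is_spiky_alt arr consecutive
instance (arr : List Bool) (consecutive : Int) (out : Bool) : Decidable (Spec_is_spiky arr consecutive out) := by unfold Spec_is_spiky; infer_instance

-- ===== CLAIM (what is proved, stated in full; the proofs are below) =====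
def Claim_equal_is_spiky : Prop := ∀ (arr : List Bool) (consecutive : Int), Dom_is_spiky arr consecutive → Spec_is_spiky arr consecutive (is_spiky arr consecutive)

-- ===== LEMMAS AND PROOFS =====

-- Invariant: checking the closed runs collected so far, plus B's counter for the open run,
-- computes the same answer as finishing A's loop and scanning `indices` at the end.
theorem is_spiky_loop_eq (consecutive : Int) :
    ∀ (l : List (Int × Bool)) (indices : List (List Int)) (inevent : Bool) (newevent : List Int),
      (inevent = true → newevent.length > 0) →
      ((l.foldl
        (fun (st : List (List Int) × Bool × List Int) p =>
          if p.2 == true then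
            if st.2.1 then (st.1, st.2.1, st.2.2 ++ [p.1])
            else (st.1, true, [p.1])
          else
            if st.2.1 then (st.1 ++ [st.2.2], false, st.2.2)
            else st)
        (indices, inevent, newevent)).1.any
          (fun idx => decide ((idx.length : Int) > consecutive)))
      = (indices.any (fun idx => decide ((idx.length : Int) > consecutive))
          || is_spiky_altLoop consecutive
               (if inevent then (newevent.length : Int) else 0) (l.map (·.2))) := by
  intro l
  induction l with
  | nil =>
    intro indices inevent newevent _
    simp [is_spiky_altLoop]
  | cons p rest ih =>
    intro indices inevent newevent hne
    rcases p with ⟨i, v⟩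
    cases v with
    | true =>
      cases inevent with
      | true =>
        simp only [List.foldl_cons, List.map_cons]
        rw [ih _ _ _ (by simp)]
        simp [is_spiky_altLoop]
      | false =>
        simp only [List.foldl_cons, List.map_cons]
        rw [ih _ _ _ (by simp)]
        simp [is_spiky_altLoop]
    | false =>
      cases inevent with
      | true =>
        simp only [List.foldl_cons, List.map_cons]
        rw [ih _ _ _ (by simp)]
        have hpos : (0 : Int) < (newevent.length : Int) := by
          have := hne rfl; exact_mod_cast this
        by_cases hc : (newevent.length : Int) > consecutive
        · simp [is_spiky_altLoop, hc]
          exact Or.inr (Or.inl (by exact_mod_cast hpos))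
        · simp [is_spiky_altLoop, hc]
      | false =>
        simp only [List.foldl_cons, List.map_cons]
        rw [ih _ _ _ (by simp)]
        simp [is_spiky_altLoop]

-- ===== VERDICT (by name: the statement is the Claim_ definition above) =====
theorem is_spiky_spec : Claim_equal_is_spiky := by
  intro arr consecutive _
  unfold Spec_is_spiky
  simp only [is_spiky, is_spiky_alt]
  have h := is_spiky_loop_eq consecutive (PySem.List.enumerate arr) [] false []
    (by intro h; cases h)
  simp only [PySem.List.map_snd_enumerate] at h
  split
  · next hz =>
    rw [List.length_eq_zero_iff] at hz
    rw [hz] at h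
    simpa using h.symm
  · next =>
    simpa using h
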